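-- pv_equiv track=rewrite | github.com/alps-lab/deepclean | theclean/experimental/prototype2/actions.py | remove_parenthesis_on_tokens
-- ===== SOURCE A (Python) =====
-- def remove_parenthesis_on_tokens(tokens):
--     index_set = set()
--     skip_mode = False
--     stack = []
--     for i, token in enumerate(tokens):
--         if token == '-LRB-':
--             skip_mode = True
--             stack.append(token)
--         elif token == '-RRB-':
--             if len(stack) > 0:
--                 stack.pop()
--             if len(stack) == 0:
--                 skip_mode = False
--         elif not skip_mode:
--             index_set.add(i)
--
--     return index_set
-- ===== SOURCE B (Python) =====
-- def _skip_group(tokens, i):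
--     """Consume a parenthesized group whose '-LRB-' is just before index i;
--     return the index just past its matching '-RRB-' (len(tokens) if unmatched)."""
--     n = len(tokens)
--     while i < n:
--         t = tokens[i]
--         if t == '-LRB-':
--             i = _skip_group(tokens, i + 1)
--         elif t == '-RRB-':
--             return i + 1
--         else:
--             i += 1
--     return n
--
--
-- def remove_parenthesis_on_tokens(tokens):
--     # Recursive-descent scan: jump over whole parenthesized groups at once
--     # instead of maintaining a per-token skip flag and stack.
--     result = set()
--     i, n = 0, len(tokens)
--     while i < n:
--         t = tokens[i]
--         if t == '-LRB-':
--             i = _skip_group(tokens, i + 1)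
--         elif t == '-RRB-':
--             i += 1
--         else:
--             result.add(i)
--             i += 1
--     return result
-- ===== Notes on version B (the rewrite author's own statement) =====
-- stated objective: alternative
-- what changed: Replaced the fused per-token state machine (skip_mode flag + explicit stack) by a recursive-descent scanner: an index-jumping main loop with no skip state that, on '-LRB-', calls a recursive _skip_group helper to consume the whole parenthesized group (recursing for nested groups) and resumes past its matching '-RRB-'.
import Mathlib
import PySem

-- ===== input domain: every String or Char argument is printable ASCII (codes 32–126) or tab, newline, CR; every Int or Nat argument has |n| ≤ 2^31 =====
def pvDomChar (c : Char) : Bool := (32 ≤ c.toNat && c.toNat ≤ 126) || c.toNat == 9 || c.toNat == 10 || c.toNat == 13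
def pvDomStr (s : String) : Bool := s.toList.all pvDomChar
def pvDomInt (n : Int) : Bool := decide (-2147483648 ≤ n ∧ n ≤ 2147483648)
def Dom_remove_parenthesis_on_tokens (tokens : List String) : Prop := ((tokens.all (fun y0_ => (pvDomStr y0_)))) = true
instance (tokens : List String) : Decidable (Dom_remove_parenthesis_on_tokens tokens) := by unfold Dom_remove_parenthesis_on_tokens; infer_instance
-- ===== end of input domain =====

-- B replaces A's fused flag+stack state machine by a recursive-descent scanner
-- that jumps over whole parenthesized groups (objective: alternative, same cost).
-- ===== PORT A =====
def remove_parenthesis_on_tokens (tokens : List String) : List Int :=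
  -- for i, token in enumerate(tokens): ... ; state = (index_set, skip_mode, stack)
  ((PySem.List.enumerate tokens 0).foldl
    (fun (st : PySem.Set Int × Bool × List String) p =>
      if p.2 = "-LRB-" then (st.1, true, st.2.2 ++ [p.2])
      else if p.2 = "-RRB-" then
        let stack' := if st.2.2.length > 0 then st.2.2.dropLast else st.2.2
        (st.1, if stack'.length = 0 then false else st.2.1, stack')
      else if !st.2.1 then (PySem.Set.add st.1 p.1, st.2.1, st.2.2)
      else st)
    (PySem.Set.empty, false, [])).1

-- ===== PORT B =====
-- _skip_group: consume one parenthesized group over the remaining suffix `ts`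
-- (the tokens from index i on); returns the suffix and index just past the
-- matching '-RRB-'.  The subtype bound `length ≤` is the termination measure
-- for the nested recursive call (Python's recursion into nested groups).
def pvSkipGroup : (ts : List String) → Int → {p : List String × Int // p.1.length ≤ ts.length}
  | [], i => ⟨([], i), le_refl _⟩
  | t :: ts, i =>
    if t = "-LRB-" then
      let r := pvSkipGroup ts (i + 1)
      let r2 := pvSkipGroup r.val.1 r.val.2
      ⟨r2.val, le_trans r2.property (Nat.le_succ_of_le r.property)⟩
    else if t = "-RRB-" then ⟨(ts, i + 1), Nat.le_succ _⟩
    else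
      let r := pvSkipGroup ts (i + 1)
      ⟨r.val, Nat.le_succ_of_le r.property⟩
termination_by ts => ts.length
decreasing_by
  · simp
  · exact Nat.lt_succ_of_le r.property
  · simp

-- main index-jumping loop of B: collect kept indices, skipping whole groups
def pvAltGo : (ts : List String) → Int → List Int
  | [], _ => []
  | t :: ts, i =>
    if t = "-LRB-" then
      let r := pvSkipGroup ts (i + 1)
      pvAltGo r.val.1 r.val.2
    else if t = "-RRB-" then pvAltGo ts (i + 1)
    else i :: pvAltGo ts (i + 1)
termination_by ts => ts.length
decreasing_by
  · exact Nat.lt_succ_of_le r.property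
  · simp
  · simp

def remove_parenthesis_on_tokens_alt (tokens : List String) : List Int :=
  PySem.Set.ofList (pvAltGo tokens 0)

-- ===== PRECONDITION & SPEC =====
def Spec_remove_parenthesis_on_tokens (tokens : List String) (out : List Int) : Prop := out = remove_parenthesis_on_tokens_alt tokens
instance (tokens : List String) (out : List Int) : Decidable (Spec_remove_parenthesis_on_tokens tokens out) := by unfold Spec_remove_parenthesis_on_tokens; infer_instance

-- ===== CLAIM (what is proved, stated in full; the proofs are below) =====
def Claim_equal_remove_parenthesis_on_tokens : Prop := ∀ (tokens : List String), Dom_remove_parenthesis_on_tokens tokens → Spec_remove_parenthesis_on_tokens tokens (remove_parenthesis_on_tokens tokens)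

-- ===== LEMMAS AND PROOFS =====

-- reference recursion: the indices A selects starting at index i with current depth d
def pvF (ts : List String) (i d : Int) : List Int :=
  match ts with
  | [] => []
  | t :: ts =>
    let d' := if t = "-LRB-" then d + 1 else if t = "-RRB-" then max (d - 1) 0 else d
    (if t ≠ "-LRB-" ∧ t ≠ "-RRB-" ∧ d' = 0 then [i] else []) ++ pvF ts (i + 1) d'

lemma pvF_mem_le (ts : List String) (i d : Int) : ∀ x ∈ pvF ts i d, i ≤ x := by
  induction ts generalizing i d with
  | nil => simp [pvF]
  | cons t ts ih =>
    intro x hx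
    simp only [pvF, List.mem_append] at hx
    rcases hx with hx | hx
    · split_ifs at hx <;> simp_all
    · have := ih (i + 1) _ x hx; omega

lemma pvF_nodup (ts : List String) (i d : Int) : (pvF ts i d).Nodup := by
  induction ts generalizing i d with
  | nil => simp [pvF]
  | cons t ts ih =>
    simp only [pvF]
    split_ifs <;> simp only [List.singleton_append, List.nil_append] <;>
      first
        | exact ih _ _
        | exact List.nodup_cons.mpr
            ⟨fun hx => by have := pvF_mem_le ts (i + 1) _ i hx; omega, ih _ _⟩

-- main loop invariant for A's fold
lemma pvA_loop (ts : List String) :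
    ∀ (i : Int) (s : PySem.Set Int) (skip : Bool) (stack : List String),
    skip = decide (stack ≠ []) → (∀ x ∈ s, x < i) →
    ((PySem.List.enumerate ts i).foldl
      (fun (st : PySem.Set Int × Bool × List String) p =>
        if p.2 = "-LRB-" then (st.1, true, st.2.2 ++ [p.2])
        else if p.2 = "-RRB-" then
          let stack' := if st.2.2.length > 0 then st.2.2.dropLast else st.2.2
          (st.1, if stack'.length = 0 then false else st.2.1, stack')
        else if !st.2.1 then (PySem.Set.add st.1 p.1, st.2.1, st.2.2)
        else st)
      (s, skip, stack)).1 = s ++ pvF ts i (stack.length : Int) := by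
  induction ts with
  | nil => intro i s skip stack _ _; simp [pvF]
  | cons t ts ih =>
    intro i s skip stack hskip hs
    rw [PySem.List.enumerate_cons]
    simp only [List.foldl_cons]
    by_cases h1 : t = "-LRB-"
    · rw [if_pos h1]
      rw [ih (i + 1) s true (stack ++ [t]) (by simp) (fun x hx => by have := hs x hx; omega)]
      simp only [pvF, h1, List.length_append]
      simp
    · by_cases h2 : t = "-RRB-"
      · rw [if_neg h1, if_pos h2]
        set nst := if stack.length > 0 then stack.dropLast else stack with hnst
        have hlen : (nst.length : Int) = max ((stack.length : Int) - 1) 0 := by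
          rcases stack with _ | ⟨x, xs⟩ <;> simp [hnst]
        have hskip' : (if nst.length = 0 then false else skip) = decide (nst ≠ []) := by
          by_cases hn : nst.length = 0
          · simp [List.length_eq_zero_iff.mp hn]
          · have hne : nst ≠ [] := fun hc => hn (by simp [hc])
            have hstk : stack ≠ [] := by
              intro hc
              apply hne
              simp [hnst, hc]
            simp [hn, hne, hskip, hstk]
        rw [ih (i + 1) s _ nst hskip' (fun x hx => by have := hs x hx; omega)]
        simp only [pvF, h2]
        simp [hlen]
      · rw [if_neg h1, if_neg h2]
        cases skip with
        | true =>
          rw [if_neg (by decide)]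
          have hne : stack ≠ [] := by
            intro hc
            rw [hc] at hskip
            simp at hskip
          have hd : ¬ ((stack.length : Int) = 0) := by
            intro hc
            exact hne (List.length_eq_zero_iff.mp (by exact_mod_cast hc))
          rw [ih (i + 1) s true stack hskip (fun x hx => by have := hs x hx; omega)]
          simp [pvF, h1, h2, hne]
        | false =>
          rw [if_pos (by decide)]
          have hstk : stack = [] := by
            by_contra hc
            simp [hc] at hskip
          have hi : i ∉ s := fun hc => by have := hs i hc; omega
          have hadd : PySem.Set.add s i = s ++ [i] := by
            simp [PySem.Set.add, PySem.Set.contains, hi]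
          rw [ih (i + 1) (PySem.Set.add s i) false stack hskip
            (fun x hx => by
              rw [hadd] at hx
              rcases List.mem_append.mp hx with hx | hx
              · have := hs x hx; omega
              · simp at hx; omega)]
          simp [pvF, h1, h2, hstk, hadd]

-- at depth d ≥ 1, A selects nothing until the group closes: pvF jumps via pvSkipGroup
lemma pvF_skip (n : Nat) : ∀ (ts : List String), ts.length ≤ n → ∀ (i d : Int), 1 ≤ d →
    pvF ts i d = pvF (pvSkipGroup ts i).val.1 (pvSkipGroup ts i).val.2 (d - 1) := by
  induction n with
  | zero =>
    intro ts hts i d hd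
    have : ts = [] := List.length_eq_zero_iff.mp (Nat.le_zero.mp hts)
    subst this
    simp [pvF, pvSkipGroup]
  | succ n ih =>
    intro ts hts i d hd
    match ts with
    | [] => simp [pvF, pvSkipGroup]
    | t :: ts =>
      have hts' : ts.length ≤ n := by simp at hts; omega
      by_cases h1 : t = "-LRB-"
      · have e1 := ih ts hts' (i + 1) (d + 1) (by omega)
        have e2 := ih (pvSkipGroup ts (i + 1)).val.1
          (le_trans (pvSkipGroup ts (i + 1)).property hts')
          (pvSkipGroup ts (i + 1)).val.2 d hd
        have hstep : pvF (t :: ts) i d = pvF ts (i + 1) (d + 1) := by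
          simp [pvF, h1]
        have hsg : (pvSkipGroup (t :: ts) i).val
            = (pvSkipGroup (pvSkipGroup ts (i + 1)).val.1 (pvSkipGroup ts (i + 1)).val.2).val := by
          rw [pvSkipGroup]; simp [h1]
        rw [hstep, e1, hsg]
        simpa using e2
      · by_cases h2 : t = "-RRB-"
        · have hstep : pvF (t :: ts) i d = pvF ts (i + 1) (d - 1) := by
            have hm : max (d - 1) 0 = d - 1 := by omega
            simp [pvF, h2, hm]
          have hsg : (pvSkipGroup (t :: ts) i).val = (ts, i + 1) := by
            rw [pvSkipGroup]; simp [h2]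
          rw [hstep, hsg]
        · have e1 := ih ts hts' (i + 1) d hd
          have hstep : pvF (t :: ts) i d = pvF ts (i + 1) d := by
            have hd0 : ¬ (d = 0) := by omega
            simp [pvF, h1, h2, hd0]
          have hsg : (pvSkipGroup (t :: ts) i).val = (pvSkipGroup ts (i + 1)).val := by
            rw [pvSkipGroup]; simp [h1, h2]
          rw [hstep, e1, hsg]

-- at depth 0, A's selection pvF is exactly B's recursive-descent loop
lemma pvF_zero (n : Nat) : ∀ (ts : List String), ts.length ≤ n → ∀ (i : Int),
    pvF ts i 0 = pvAltGo ts i := by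
  induction n with
  | zero =>
    intro ts hts i
    have : ts = [] := List.length_eq_zero_iff.mp (Nat.le_zero.mp hts)
    subst this
    simp [pvF, pvAltGo]
  | succ n ih =>
    intro ts hts i
    match ts with
    | [] => simp [pvF, pvAltGo]
    | t :: ts =>
      have hts' : ts.length ≤ n := by simp at hts; omega
      by_cases h1 : t = "-LRB-"
      · have e1 := pvF_skip n ts hts' (i + 1) 1 (by omega)
        have e2 := ih (pvSkipGroup ts (i + 1)).val.1
          (le_trans (pvSkipGroup ts (i + 1)).property hts')
          (pvSkipGroup ts (i + 1)).val.2
        have hstep : pvF (t :: ts) i 0 = pvF ts (i + 1) 1 := by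
          simp [pvF, h1]
        have halt : pvAltGo (t :: ts) i
            = pvAltGo (pvSkipGroup ts (i + 1)).val.1 (pvSkipGroup ts (i + 1)).val.2 := by
          rw [pvAltGo]; simp [h1]
        rw [hstep, e1, halt]
        simpa using e2
      · by_cases h2 : t = "-RRB-"
        · have hstep : pvF (t :: ts) i 0 = pvF ts (i + 1) 0 := by
            simp [pvF, h2]
          have halt : pvAltGo (t :: ts) i = pvAltGo ts (i + 1) := by
            rw [pvAltGo]; simp [h2]
          rw [hstep, halt]
          exact ih ts hts' (i + 1)
        · have hstep : pvF (t :: ts) i 0 = i :: pvF ts (i + 1) 0 := by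
            simp [pvF, h1, h2]
          have halt : pvAltGo (t :: ts) i = i :: pvAltGo ts (i + 1) := by
            rw [pvAltGo]; simp [h1, h2]
          rw [hstep, halt, ih ts hts' (i + 1)]

-- ===== VERDICT (by name: the statement is the Claim_ definition above) =====
theorem remove_parenthesis_on_tokens_spec : Claim_equal_remove_parenthesis_on_tokens := by
  intro tokens _
  unfold Spec_remove_parenthesis_on_tokens remove_parenthesis_on_tokens remove_parenthesis_on_tokens_alt
  have hf := pvF_zero tokens.length tokens (le_refl _) 0
  have hnd : (pvAltGo tokens 0).Nodup := hf ▸ pvF_nodup tokens 0 0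
  rw [PySem.Set.ofList_eq_self_of_nodup _ hnd, ← hf]
  simpa using pvA_loop tokens 0 PySem.Set.empty false [] (by simp) (by simp [PySem.Set.empty])
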